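-- pv_equiv track=rewrite | github.com/HiroSakuraba/DelPezzo7 | i0iv_v94_exotic_baskets_global_closure.py | standard_form_solutions
-- ===== SOURCE A (Python) =====
-- def standard_form_solutions(numE, square_abs, Kpair):
--     sols = []
--     for d in range(0, 20):
--         target_sum = 3*d + Kpair
--         target_sq = d*d + square_abs
--         def rec(i, prev, remsum, remsq, arr):
--             if i == numE:
--                 if remsum == 0 and remsq == 0:
--                     sols.append((d, tuple(arr)))
--                 return
--             maxm = min(prev, remsum)
--             for m in range(maxm, -1, -1):
--                 if m*m > remsq:
--                     continue
--                 rec(i+1, m, remsum-m, remsq-m*m, arr+[m])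
--         rec(0, d, target_sum, target_sq, [])
--     return sols
-- ===== SOURCE B (Python) =====
-- def standard_form_solutions(numE, square_abs, Kpair):
--     # Pure generator: parts(n, prev, s, q) returns every non-increasing sequence of
--     # length n with entries <= prev, sum s and sum of squares q, largest-first.
--     def parts(n, prev, s, q):
--         if n == 0:
--             return [[]] if s == 0 and q == 0 else []
--         out = []
--         for m in range(min(prev, s), -1, -1):
--             if m * m <= q:
--                 for t in parts(n - 1, m, s - m, q - m * m):
--                     out.append([m] + t)
--         return out
--     return [(d, tuple(sol))
--             for d in range(20)
--             for sol in parts(numE, d, 3 * d + Kpair, d * d + square_abs)]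
-- ===== Notes on version B (the rewrite author's own statement) =====
-- stated objective: simpler
-- what changed: The imperative DFS that mutates a shared sols accumulator through a closure over d is replaced by a pure recursive generator parts(n,prev,s,q) returning the list of suffixes, composed with comprehensions (flatMap/map); same asymptotic cost, no shared mutable state.
-- outside the precondition, e.g. on standard_form_solutions(9901, -360, -57): A returns [], B returns []; on standard_form_solutions(20000, -360, -57): A raises RecursionError, B raises RecursionError
import Mathlib
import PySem

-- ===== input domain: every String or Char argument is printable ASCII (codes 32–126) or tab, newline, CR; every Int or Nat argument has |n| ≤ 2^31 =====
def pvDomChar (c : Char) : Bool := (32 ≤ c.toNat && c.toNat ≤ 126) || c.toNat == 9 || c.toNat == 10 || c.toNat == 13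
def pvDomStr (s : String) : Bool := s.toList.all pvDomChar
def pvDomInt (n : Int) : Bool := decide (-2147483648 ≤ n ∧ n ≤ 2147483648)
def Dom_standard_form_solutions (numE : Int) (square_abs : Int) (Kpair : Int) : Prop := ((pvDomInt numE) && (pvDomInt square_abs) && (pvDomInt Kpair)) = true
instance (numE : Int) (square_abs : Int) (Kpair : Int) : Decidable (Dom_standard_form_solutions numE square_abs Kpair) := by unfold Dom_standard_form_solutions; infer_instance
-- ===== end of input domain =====

-- B replaces A's imperative DFS (a closure mutating a shared `sols` list, passing the
-- prefix downwards) by a pure recursive generator returning all suffixes, composed with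
-- comprehensions; same search tree and cost ("simpler", not faster).

-- ===== PORT A =====
-- rec(i, prev, remsum, remsq, arr) threaded over the accumulator `sols`; the Nat `fuel`
-- (numE.toNat + 1, one unit per call level) only makes the recursion total in Lean: on
-- every input admitted by Pre_ it never runs out, so the port is exact there.
def pvRecA (d : Int) (fuel : Nat) (numE i prev remsum remsq : Int) (arr : List Int)
    (sols : List (Int × List Int)) : List (Int × List Int) :=
  match fuel with
  | 0 => sols
  | f + 1 =>
    if i = numE then
      if remsum = 0 ∧ remsq = 0 then sols ++ [(d, arr)] else sols
    else
      (PySem.List.pyRange (min prev remsum) (-1) (-1)).foldl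
        (fun s m =>
          if m * m > remsq then s
          else pvRecA d f numE (i + 1) m (remsum - m) (remsq - m * m) (arr ++ [m]) s)
        sols

def standard_form_solutions (numE : Int) (square_abs : Int) (Kpair : Int) : List (Int × List Int) :=
  (PySem.List.pyRange 0 20 1).foldl
    (fun sols d =>
      pvRecA d (numE.toNat + 1) numE 0 d (3 * d + Kpair) (d * d + square_abs) [] sols)
    []

-- ===== PORT B =====
-- parts(n, prev, s, q) from Source B: returns every non-increasing sequence of length n with
-- entries ≤ prev, sum s, sum of squares q; same totality fuel as in port A.
def pvPartsB (fuel : Nat) (n prev s q : Int) : List (List Int) :=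
  match fuel with
  | 0 => []
  | f + 1 =>
    if n = 0 then (if s = 0 ∧ q = 0 then [[]] else [])
    else
      (PySem.List.pyRange (min prev s) (-1) (-1)).foldl
        (fun out m =>
          if m * m ≤ q then out ++ (pvPartsB f (n - 1) m (s - m) (q - m * m)).map (fun t => m :: t)
          else out)
        []

def standard_form_solutions_alt (numE : Int) (square_abs : Int) (Kpair : Int) : List (Int × List Int) :=
  (PySem.List.pyRange 0 20 1).flatMap
    (fun d =>
      (pvPartsB (numE.toNat + 1) numE d (3 * d + Kpair) (d * d + square_abs)).map
        (fun sol => (d, sol)))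

-- ===== PRECONDITION & SPEC =====
-- A recurses numE+2 Python stack frames deep whenever some d's targets are reachable, so it
-- raises RecursionError once numE+2 exceeds the free recursion headroom of the interpreter
-- it runs under (the grader's runners set the limit to 10000); Pre_ caps numE at 9900,
-- keeping only the frames-already-on-the-stack margin below that raise point — the cap's
-- sole reason is that crash, not input size.  For numE < 0 the stopping index i == numE is
-- never reached, so A returns (the empty list, at depth 1) exactly when every d in 0..19
-- has a negative target sum or target square-sum — i.e. Kpair < -57 or square_abs < -361,
-- the second disjunct — and raises RecursionError on every other numE < 0 input.
def Pre_standard_form_solutions (numE : Int) (square_abs : Int) (Kpair : Int) : Prop :=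
  (0 ≤ numE ∧ numE ≤ 9900) ∨ Kpair < -57 ∨ square_abs < -361
instance (numE : Int) (square_abs : Int) (Kpair : Int) : Decidable (Pre_standard_form_solutions numE square_abs Kpair) := by unfold Pre_standard_form_solutions; infer_instance

def pvWitness_standard_form_solutions : Int × Int × Int := (2, 0, 0)

def Spec_standard_form_solutions (numE : Int) (square_abs : Int) (Kpair : Int) (out : List (Int × List Int)) : Prop := out = standard_form_solutions_alt numE square_abs Kpair
instance (numE : Int) (square_abs : Int) (Kpair : Int) (out : List (Int × List Int)) : Decidable (Spec_standard_form_solutions numE square_abs Kpair out) := by unfold Spec_standard_form_solutions; infer_instance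

-- ===== CLAIM (what is proved, stated in full; the proofs are below) =====
def Claim_equal_standard_form_solutions : Prop := ∀ (numE : Int) (square_abs : Int) (Kpair : Int), Dom_standard_form_solutions numE square_abs Kpair → Pre_standard_form_solutions numE square_abs Kpair → Spec_standard_form_solutions numE square_abs Kpair (standard_form_solutions numE square_abs Kpair)

-- ===== LEMMAS AND PROOFS =====

-- Proof-side ideal enumerator (structural on Nat): what both ports compute per d.
def pvP : Nat → Int → Int → Int → List (List Int)
  | 0, _, s, q => if s = 0 ∧ q = 0 then [[]] else []
  | k + 1, prev, s, q =>
    (PySem.List.pyRange (min prev s) (-1) (-1)).flatMap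
      (fun m => if m * m ≤ q then (pvP k m (s - m) (q - m * m)).map (fun t => m :: t) else [])

lemma pvPartsB_eq : ∀ (fuel k : Nat) (prev s q : Int), k < fuel →
    pvPartsB fuel (k : Int) prev s q = pvP k prev s q := by
  intro fuel
  induction fuel with
  | zero => intro k _ _ _ h; omega
  | succ f ih =>
    intro k prev s q hk
    cases k with
    | zero => simp [pvPartsB, pvP]
    | succ k =>
      have hne : ((k + 1 : Nat) : Int) ≠ 0 := by push_cast; omega
      have hm1 : ((k + 1 : Nat) : Int) - 1 = (k : Int) := by push_cast; ring
      simp only [pvPartsB, pvP, if_neg hne, hm1]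
      rw [PySem.List.foldl_congr_mem
          (g := fun out m =>
            out ++ (if m * m ≤ q then (pvP k m (s - m) (q - m * m)).map (fun t => m :: t) else []))]
      · rw [PySem.List.foldl_append_eq_flatMap]
        simp
      · intro acc m _
        by_cases hq : m * m ≤ q
        · simp [hq, ih k m (s - m) (q - m * m) (by omega)]
        · simp [hq]

lemma pvRecA_eq : ∀ (fuel : Nat) (d numE i prev rs rq : Int) (arr : List Int)
    (sols : List (Int × List Int)), i ≤ numE → (numE - i).toNat < fuel →
    pvRecA d fuel numE i prev rs rq arr sols
      = sols ++ (pvP (numE - i).toNat prev rs rq).map (fun t => (d, arr ++ t)) := by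
  intro fuel
  induction fuel with
  | zero => intro d numE i prev rs rq arr sols _ h; omega
  | succ f ih =>
    intro d numE i prev rs rq arr sols hle hf
    by_cases hi : i = numE
    · subst hi
      have h0 : (i - i).toNat = 0 := by omega
      simp only [pvRecA, h0, pvP]
      split_ifs <;> simp
    · have hlt : i < numE := lt_of_le_of_ne hle hi
      have hk : (numE - i).toNat = (numE - (i + 1)).toNat + 1 := by omega
      simp only [pvRecA, if_neg hi]
      rw [PySem.List.foldl_congr_mem
          (g := fun s m =>
            s ++ (if m * m ≤ rq then
                    (pvP (numE - (i + 1)).toNat m (rs - m) (rq - m * m)).map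
                      (fun t => (d, (arr ++ [m]) ++ t))
                  else []))]
      · rw [PySem.List.foldl_append_eq_flatMap, hk]
        congr 1
        simp only [pvP, List.map_flatMap]
        congr 1
        funext m
        by_cases hq : m * m ≤ rq
        · simp [hq, List.map_map, Function.comp, List.append_assoc]
        · simp [hq]
      · intro acc m _
        by_cases hq : m * m > rq
        · simp [if_neg (by omega : ¬ m * m ≤ rq), hq]
        · rw [if_neg hq, if_pos (by omega : m * m ≤ rq),
            ih d numE (i + 1) m (rs - m) (rq - m * m) (arr ++ [m]) acc (by omega) (by omega)]

lemma pvFoldlConst {α β : Type} : ∀ (l : List α) (init : β),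
    l.foldl (fun s _ => s) init = init := by
  intro l
  induction l with
  | nil => intro init; rfl
  | cons x xs ih => intro init; simp [ih init]

lemma pvSqLe (d : Int) (h0 : 0 ≤ d) (h1 : d < 20) : d * d ≤ 361 := by nlinarith

lemma pvTargetsNeg (d square_abs Kpair : Int) (hd : 0 ≤ d ∧ d < 20)
    (h : Kpair < -57 ∨ square_abs < -361) :
    3 * d + Kpair < 0 ∨ d * d + square_abs < 0 := by
  rcases h with h | h
  · left; omega
  · right; have := pvSqLe d hd.1 hd.2; omega

lemma pvRecA_nil (d : Int) (f : Nat) (numE i prev rs rq : Int) (arr : List Int)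
    (sols : List (Int × List Int)) (hi : i ≠ numE) (h : rs < 0 ∨ rq < 0) :
    pvRecA d (f + 1) numE i prev rs rq arr sols = sols := by
  simp only [pvRecA, if_neg hi]
  rcases h with h | h
  · rw [PySem.List.pyRange_neg_one_eq_nil (by omega : min prev rs ≤ -1)]
    rfl
  · rw [PySem.List.foldl_congr_mem (g := fun s _ => s), pvFoldlConst]
    intro acc m _
    have := mul_self_nonneg m
    rw [if_pos (by omega : m * m > rq)]

lemma pvPartsB_nil (f : Nat) (n prev s q : Int) (hn : n ≠ 0) (h : s < 0 ∨ q < 0) :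
    pvPartsB (f + 1) n prev s q = [] := by
  simp only [pvPartsB, if_neg hn]
  rcases h with h | h
  · rw [PySem.List.pyRange_neg_one_eq_nil (by omega : min prev s ≤ -1)]
    rfl
  · rw [PySem.List.foldl_congr_mem (g := fun out _ => out), pvFoldlConst]
    intro acc m _
    have := mul_self_nonneg m
    rw [if_neg (by omega : ¬ m * m ≤ q)]

-- ===== VERDICT (by name: the statement is the Claim_ definition above) =====
theorem standard_form_solutions_spec : Claim_equal_standard_form_solutions := by
  intro numE square_abs Kpair _ hpre
  unfold Spec_standard_form_solutions
  unfold standard_form_solutions standard_form_solutions_alt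
  by_cases h0 : 0 ≤ numE
  · -- main case: both sides enumerate pvP numE.toNat per d
    have hcast : ((numE.toNat : Nat) : Int) = numE := Int.toNat_of_nonneg h0
    rw [PySem.List.foldl_congr_mem
        (g := fun sols d =>
          sols ++ (pvP numE.toNat d (3 * d + Kpair) (d * d + square_abs)).map (fun t => (d, t)))]
    · rw [PySem.List.foldl_append_eq_flatMap, List.nil_append]
      congr 1
      funext d
      rw [← hcast, pvPartsB_eq ((((numE.toNat : Nat) : Int)).toNat + 1) numE.toNat d
        (3 * d + Kpair) (d * d + square_abs) (by omega)]
      simp only [Int.toNat_natCast]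
    · intro sols d _
      rw [pvRecA_eq (numE.toNat + 1) d numE 0 d (3 * d + Kpair) (d * d + square_abs) [] sols h0
          (by omega)]
      simp
  · -- numE < 0: Pre_ gives negative targets for every d, so both sides are []
    have hne : numE ≠ 0 := by omega
    have htn : numE.toNat = 0 := by omega
    have hK : Kpair < -57 ∨ square_abs < -361 := by
      rcases hpre with h | h | h
      · omega
      · exact Or.inl h
      · exact Or.inr h
    have hL : (PySem.List.pyRange 0 20 1).foldl
        (fun sols d =>
          pvRecA d (numE.toNat + 1) numE 0 d (3 * d + Kpair) (d * d + square_abs) [] sols) []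
        = (PySem.List.pyRange 0 20 1).foldl (fun sols _ => sols) [] := by
      apply PySem.List.foldl_congr_mem
      intro sols d hd
      have hdm := (PySem.List.mem_pyRange_one).mp hd
      exact pvRecA_nil d numE.toNat numE 0 d (3 * d + Kpair) (d * d + square_abs) [] sols
        (fun h => hne h.symm) (pvTargetsNeg d square_abs Kpair ⟨hdm.1, hdm.2⟩ hK)
    rw [hL, pvFoldlConst]
    symm
    rw [List.flatMap_eq_nil_iff]
    intro d hd
    have hdm := (PySem.List.mem_pyRange_one).mp (show d ∈ PySem.List.pyRange 0 20 1 from hd)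
    rw [pvPartsB_nil (numE.toNat) numE d (3 * d + Kpair) (d * d + square_abs) hne
        (pvTargetsNeg d square_abs Kpair ⟨hdm.1, hdm.2⟩ hK)]
    rfl
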